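-- pv_equiv track=rewrite | github.com/witusj/experiments-notes | sketches/even-distribution.py | generate_evenly_distributed_schedule_intervals_bresenham
-- ===== SOURCE A (Python) =====
-- from typing import List
--
-- def generate_evenly_distributed_schedule_intervals_bresenham(n_patients: int, t_intervals: int) -> List[int]:
--     """
--     Alternative implementation using a Bresenham-like algorithm for even distribution.
--     This approach also guarantees all patients are scheduled.
--     """
--     # Same validation as above
--     if not isinstance(n_patients, int) or n_patients < 0:
--         raise ValueError("n_patients must be a non-negative integer.")
--     if not isinstance(t_intervals, int) or t_intervals < 0:
--         raise ValueError("t_intervals must be a non-negative integer.")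
--
--     if n_patients == 0:
--         return [0] * t_intervals
--
--     if t_intervals < n_patients:
--         raise ValueError(
--             f"Cannot schedule {n_patients} patients in only {t_intervals} intervals. "
--             "Not enough unique slots available."
--         )
--     elif n_patients == t_intervals:
--         return [1] * t_intervals
--     else:
--         schedule = [0] * t_intervals
--
--         # Bresenham-like algorithm for even distribution
--         error = t_intervals // 2
--         patients_scheduled = 0
--
--         for i in range(t_intervals):
--             error += n_patients
--             if error >= t_intervals:
--                 schedule[i] = 1
--                 patients_scheduled += 1
--                 error -= t_intervals
--
--                 # Stop once we've scheduled all patients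
--                 if patients_scheduled >= n_patients:
--                     break
--
--         return schedule
-- ===== SOURCE B (Python) =====
-- def generate_evenly_distributed_schedule_intervals_bresenham(n_patients, t_intervals):
--     if not isinstance(n_patients, int) or n_patients < 0:
--         raise ValueError("n_patients must be a non-negative integer.")
--     if not isinstance(t_intervals, int) or t_intervals < 0:
--         raise ValueError("t_intervals must be a non-negative integer.")
--     if t_intervals < n_patients:
--         raise ValueError(
--             f"Cannot schedule {n_patients} patients in only {t_intervals} intervals. "
--             "Not enough unique slots available."
--         )
--     n, t = n_patients, t_intervals
--     half = t // 2
--     return [(half + (i + 1) * n) // t - (half + i * n) // t for i in range(t)]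
-- ===== Notes on version B (the rewrite author's own statement) =====
-- stated objective: simpler
-- what changed: Replaces the stateful Bresenham loop (error accumulator, patients_scheduled counter, early break) and the n==0 / n==t special-case branches with one closed-form comprehension schedule[i] = (t//2+(i+1)*n)//t - (t//2+i*n)//t, which also covers the n==0 and n==t cases.
import Mathlib
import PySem

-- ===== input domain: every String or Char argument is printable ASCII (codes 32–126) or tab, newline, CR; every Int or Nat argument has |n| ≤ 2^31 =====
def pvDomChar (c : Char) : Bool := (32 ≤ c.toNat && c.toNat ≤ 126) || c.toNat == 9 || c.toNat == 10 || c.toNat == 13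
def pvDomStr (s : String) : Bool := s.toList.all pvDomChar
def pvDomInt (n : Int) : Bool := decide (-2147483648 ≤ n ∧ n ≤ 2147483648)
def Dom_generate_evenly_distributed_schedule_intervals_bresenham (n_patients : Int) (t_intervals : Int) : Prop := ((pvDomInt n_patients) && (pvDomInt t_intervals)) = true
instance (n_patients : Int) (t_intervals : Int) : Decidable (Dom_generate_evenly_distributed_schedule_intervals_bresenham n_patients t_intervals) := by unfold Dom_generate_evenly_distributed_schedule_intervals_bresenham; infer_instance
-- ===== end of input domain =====

-- B replaces A's stateful Bresenham error loop (and its n==t special case) with a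
-- single closed-form comprehension; objective: simpler. Equal return values on Pre_.

-- ===== PORT A =====
-- the for-loop over range(t_intervals): state = (schedule, error, patients_scheduled),
-- fuel = remaining iterations, i = current index; returning early models 'break'
def pvALoop (n t : Int) (i fuel : Nat) (schedule : List Int) (error scheduled : Int) : List Int :=
  match fuel with
  | 0 => schedule
  | fuel' + 1 =>
    let error := error + n
    if t ≤ error then
      let schedule := schedule.set i 1
      let scheduled := scheduled + 1
      let error := error - t
      if n ≤ scheduled then schedule
      else pvALoop n t (i + 1) fuel' schedule error scheduled
    else pvALoop n t (i + 1) fuel' schedule error scheduled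

def generate_evenly_distributed_schedule_intervals_bresenham (n_patients : Int) (t_intervals : Int) : List Int :=
  if n_patients = 0 then List.replicate t_intervals.toNat 0
  else if t_intervals < n_patients then []   -- Python raises ValueError here; outside Pre_
  else if n_patients = t_intervals then List.replicate t_intervals.toNat 1
  else
    pvALoop n_patients t_intervals 0 t_intervals.toNat
      (List.replicate t_intervals.toNat 0)
      (PySem.Int.floordiv t_intervals 2) 0

-- ===== PORT B =====
def generate_evenly_distributed_schedule_intervals_bresenham_alt (n_patients : Int) (t_intervals : Int) : List Int :=
  if n_patients < 0 then []                  -- Python raises ValueError here; outside Pre_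
  else if t_intervals < 0 then []            -- Python raises ValueError here; outside Pre_
  else if t_intervals < n_patients then []   -- Python raises ValueError here; outside Pre_
  else
    (PySem.List.pyRange 0 t_intervals 1).map (fun i =>
      PySem.Int.floordiv (PySem.Int.floordiv t_intervals 2 + (i + 1) * n_patients) t_intervals -
      PySem.Int.floordiv (PySem.Int.floordiv t_intervals 2 + i * n_patients) t_intervals)

-- ===== PRECONDITION & SPEC =====
-- Pre_ is exactly the set of inputs on which Python A returns (A raises ValueError
-- when n_patients < 0, t_intervals < 0, or 0 < n_patients with t_intervals < n_patients).
def Pre_generate_evenly_distributed_schedule_intervals_bresenham (n_patients : Int) (t_intervals : Int) : Prop :=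
  0 ≤ n_patients ∧ n_patients ≤ t_intervals
instance (n_patients : Int) (t_intervals : Int) : Decidable (Pre_generate_evenly_distributed_schedule_intervals_bresenham n_patients t_intervals) := by unfold Pre_generate_evenly_distributed_schedule_intervals_bresenham; infer_instance

def pvWitness_generate_evenly_distributed_schedule_intervals_bresenham : Int × Int := (3, 8)

def Spec_generate_evenly_distributed_schedule_intervals_bresenham (n_patients : Int) (t_intervals : Int) (out : List Int) : Prop := out = generate_evenly_distributed_schedule_intervals_bresenham_alt n_patients t_intervals
instance (n_patients : Int) (t_intervals : Int) (out : List Int) : Decidable (Spec_generate_evenly_distributed_schedule_intervals_bresenham n_patients t_intervals out) := by unfold Spec_generate_evenly_distributed_schedule_intervals_bresenham; infer_instance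

-- ===== CLAIM (what is proved, stated in full; the proofs are below) =====
def Claim_equal_generate_evenly_distributed_schedule_intervals_bresenham : Prop := ∀ (n_patients : Int) (t_intervals : Int), Dom_generate_evenly_distributed_schedule_intervals_bresenham n_patients t_intervals → Pre_generate_evenly_distributed_schedule_intervals_bresenham n_patients t_intervals → Spec_generate_evenly_distributed_schedule_intervals_bresenham n_patients t_intervals (generate_evenly_distributed_schedule_intervals_bresenham n_patients t_intervals)

-- ===== LEMMAS AND PROOFS =====

-- q-sequence: q i = (t//2 + i*n) // t, the number of patients scheduled in intervals [0, i)
def pvQ (n t : Int) (i : Nat) : Int :=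
  PySem.Int.floordiv (PySem.Int.floordiv t 2 + (i : Int) * n) t

-- the closed-form schedule of B (inner branch), with Nat indices
def pvFull (n t : Int) : List Int :=
  (List.range t.toNat).map (fun k => pvQ n t (k + 1) - pvQ n t k)

lemma pvHalf_bounds (t : Int) (ht : 0 < t) :
    0 ≤ PySem.Int.floordiv t 2 ∧ PySem.Int.floordiv t 2 < t := by
  rw [PySem.Int.floordiv_eq_ediv_of_pos (by norm_num)]
  omega

lemma pvQ_bracket (n t : Int) (ht : 0 < t) (i : Nat) :
    pvQ n t i * t ≤ PySem.Int.floordiv t 2 + (i : Int) * n ∧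
    PySem.Int.floordiv t 2 + (i : Int) * n < (pvQ n t i + 1) * t :=
  (PySem.Int.floordiv_eq_iff_of_pos ht).mp rfl

lemma pvQ_zero (n t : Int) (ht : 0 < t) : pvQ n t 0 = 0 := by
  have h := pvHalf_bounds t ht
  unfold pvQ
  rw [PySem.Int.floordiv_eq_iff_of_pos ht]
  push_cast
  constructor <;> nlinarith [h.1, h.2]

lemma pvQ_top (n t : Int) (_hn : 0 ≤ n) (ht : 0 < t) : pvQ n t t.toNat = n := by
  have h := pvHalf_bounds t ht
  have hcast : ((t.toNat : Int)) = t := Int.toNat_of_nonneg (le_of_lt ht)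
  unfold pvQ
  rw [hcast, PySem.Int.floordiv_eq_iff_of_pos ht]
  constructor <;> nlinarith [h.1, h.2]

lemma pvQ_succ_of_ge (n t : Int) (ht : 0 < t) (hnt : n < t) (i : Nat)
    (hC : t ≤ PySem.Int.floordiv t 2 + (i : Int) * n - pvQ n t i * t + n) :
    pvQ n t (i + 1) = pvQ n t i + 1 := by
  have hb := pvQ_bracket n t ht i
  unfold pvQ at hC hb ⊢
  rw [PySem.Int.floordiv_eq_iff_of_pos ht]
  push_cast
  constructor <;> nlinarith [hb.1, hb.2, hC, hnt]

lemma pvQ_succ_of_lt (n t : Int) (_hn : 0 ≤ n) (ht : 0 < t) (i : Nat)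
    (hC : PySem.Int.floordiv t 2 + (i : Int) * n - pvQ n t i * t + n < t) :
    pvQ n t (i + 1) = pvQ n t i := by
  have hb := pvQ_bracket n t ht i
  unfold pvQ at hC hb ⊢
  rw [PySem.Int.floordiv_eq_iff_of_pos ht]
  push_cast
  constructor <;> nlinarith [hb.1, hb.2, hC]

lemma pvQ_mono_succ (n t : Int) (hn : 0 ≤ n) (ht : 0 < t) (hnt : n < t) (i : Nat) :
    pvQ n t i ≤ pvQ n t (i + 1) := by
  by_cases hC : t ≤ PySem.Int.floordiv t 2 + (i : Int) * n - pvQ n t i * t + n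
  · rw [pvQ_succ_of_ge n t ht hnt i hC]; omega
  · rw [pvQ_succ_of_lt n t hn ht i (by omega)]

lemma pvQ_mono (n t : Int) (hn : 0 ≤ n) (ht : 0 < t) (hnt : n < t) {i j : Nat} (hij : i ≤ j) :
    pvQ n t i ≤ pvQ n t j := by
  induction j with
  | zero => simp_all
  | succ j ih =>
    rcases Nat.lt_or_ge i (j + 1) with h | h
    · exact le_trans (ih (by omega)) (pvQ_mono_succ n t hn ht hnt j)
    · have : i = j + 1 := by omega
      simp [this]

lemma pvFull_length (n t : Int) : (pvFull n t).length = t.toNat := by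
  simp [pvFull]

lemma pvFull_getElem (n t : Int) (k : Nat) (hk : k < t.toNat) :
    (pvFull n t)[k]'(by simp [pvFull_length, hk]) = pvQ n t (k + 1) - pvQ n t k := by
  simp [pvFull]

-- generic list facts for the schedule representation
lemma pvSet_append_cons {α : Type} (xs : List α) (y : α) (ys : List α) (v : α) :
    (xs ++ y :: ys).set xs.length v = xs ++ v :: ys := by
  induction xs with
  | nil => simp
  | cons a as ih => simp [ih]

lemma pvSched_shift (full : List Int) (i : Nat) (hi : i < full.length)
    (h0 : full[i] = 0) :
    full.take i ++ List.replicate (full.length - i) 0 =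
    full.take (i + 1) ++ List.replicate (full.length - (i + 1)) 0 := by
  have hrep : List.replicate (full.length - i) (0 : Int) =
      0 :: List.replicate (full.length - (i + 1)) 0 := by
    have : full.length - i = (full.length - (i + 1)) + 1 := by omega
    rw [this, List.replicate_succ]
  have htake : full.take (i + 1) = full.take i ++ [full[i]] := by
    rw [List.take_add_one]
    simp [List.getElem?_eq_getElem hi]
  rw [hrep, htake, h0]
  simp

lemma pvSched_set (full : List Int) (i : Nat) (hi : i < full.length)
    (h1 : full[i] = 1) :
    (full.take i ++ List.replicate (full.length - i) 0).set i 1 =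
    full.take (i + 1) ++ List.replicate (full.length - (i + 1)) 0 := by
  have hlen : (full.take i).length = i := by simp; omega
  have hrep : List.replicate (full.length - i) (0 : Int) =
      0 :: List.replicate (full.length - (i + 1)) 0 := by
    have : full.length - i = (full.length - (i + 1)) + 1 := by omega
    rw [this, List.replicate_succ]
  have htake : full.take (i + 1) = full.take i ++ [full[i]] := by
    rw [List.take_add_one]
    simp [List.getElem?_eq_getElem hi]
  have hset := pvSet_append_cons (full.take i) (0 : Int)
    (List.replicate (full.length - (i + 1)) 0) 1
  rw [hlen] at hset
  rw [hrep, hset, htake, h1]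
  simp

lemma pvSched_done (full : List Int) :
    ∀ (m j : Nat), full.length - j = m →
    (∀ k, j ≤ k → (hk : k < full.length) → full[k] = 0) →
    full.take j ++ List.replicate (full.length - j) 0 = full := by
  intro m
  induction m with
  | zero =>
    intro j hj _
    have : full.length ≤ j := by omega
    simp [List.take_of_length_le this, hj]
  | succ m ih =>
    intro j hj hz
    have hjlt : j < full.length := by omega
    rw [pvSched_shift full j hjlt (hz j le_rfl hjlt)]
    exact ih (j + 1) (by omega) (fun k hk hklt => hz k (by omega) hklt)

-- the loop invariant: entering iteration i with schedule = (closed form on [0,i)) ++ zeros,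
-- error = t//2 + i*n - (q i)*t, patients_scheduled = q i < n, the loop returns pvFull
lemma pvALoop_eq (n t : Int) (hn : 0 < n) (hnt : n < t) :
    ∀ (fuel i : Nat), i + fuel = t.toNat → pvQ n t i < n →
    pvALoop n t i fuel
      ((pvFull n t).take i ++ List.replicate (t.toNat - i) 0)
      (PySem.Int.floordiv t 2 + (i : Int) * n - pvQ n t i * t)
      (pvQ n t i) = pvFull n t := by
  have ht : 0 < t := lt_trans hn hnt
  intro fuel
  induction fuel with
  | zero =>
    intro i hi hq
    have hiT : i = t.toNat := by omega
    rw [hiT, pvQ_top n t (le_of_lt hn) ht] at hq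
    omega
  | succ fuel ih =>
    intro i hi hq
    have hilt : i < t.toNat := by omega
    have hlen := pvFull_length n t
    have hifull : i < (pvFull n t).length := by omega
    unfold pvALoop
    simp only []
    by_cases hC : t ≤ PySem.Int.floordiv t 2 + (i : Int) * n - pvQ n t i * t + n
    · -- schedule[i] = 1 branch
      have hq1 : pvQ n t (i + 1) = pvQ n t i + 1 := pvQ_succ_of_ge n t ht hnt i hC
      have hfi : (pvFull n t)[i]'hifull = 1 := by
        rw [pvFull_getElem n t i hilt, hq1]; ring
      have hset := pvSched_set (pvFull n t) i hifull hfi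
      rw [hlen] at hset
      rw [if_pos hC, hset]
      by_cases hdone : n ≤ pvQ n t i + 1
      · -- break: all remaining entries are 0
        rw [if_pos hdone]
        have hqn : pvQ n t (i + 1) = n := by omega
        have hz : ∀ k, i + 1 ≤ k → (hk : k < (pvFull n t).length) → (pvFull n t)[k] = 0 := by
          intro k hk hklt
          have hm1 : pvQ n t k ≤ n := by
            have h := pvQ_mono n t (le_of_lt hn) ht hnt (show k ≤ t.toNat by omega)
            rwa [pvQ_top n t (le_of_lt hn) ht] at h
          have hm2 : n ≤ pvQ n t k := by
            have h := pvQ_mono n t (le_of_lt hn) ht hnt hk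
            rwa [hqn] at h
          have hm3 : pvQ n t (k + 1) ≤ n := by
            have h := pvQ_mono n t (le_of_lt hn) ht hnt (show k + 1 ≤ t.toNat by omega)
            rwa [pvQ_top n t (le_of_lt hn) ht] at h
          have hm4 : n ≤ pvQ n t (k + 1) := by
            have h := pvQ_mono n t (le_of_lt hn) ht hnt (show i + 1 ≤ k + 1 by omega)
            rwa [hqn] at h
          rw [pvFull_getElem n t k (by omega)]
          omega
        have hdone' := pvSched_done (pvFull n t) ((pvFull n t).length - (i + 1)) (i + 1) rfl hz
        rw [hlen] at hdone'
        exact hdone'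
      · -- continue
        rw [if_neg hdone]
        have herr : PySem.Int.floordiv t 2 + (i : Int) * n - pvQ n t i * t + n - t =
            PySem.Int.floordiv t 2 + ((i + 1 : Nat) : Int) * n - pvQ n t (i + 1) * t := by
          rw [hq1]; push_cast; ring
        rw [herr, ← hq1]
        exact ih (i + 1) (by omega) (by omega)
    · -- schedule[i] stays 0
      have hq0 : pvQ n t (i + 1) = pvQ n t i := pvQ_succ_of_lt n t (le_of_lt hn) ht i (by omega)
      have hfi : (pvFull n t)[i]'hifull = 0 := by
        rw [pvFull_getElem n t i hilt, hq0]; ring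
      have hshift := pvSched_shift (pvFull n t) i hifull hfi
      rw [hlen] at hshift
      rw [if_neg hC, hshift]
      have herr : PySem.Int.floordiv t 2 + (i : Int) * n - pvQ n t i * t + n =
          PySem.Int.floordiv t 2 + ((i + 1 : Nat) : Int) * n - pvQ n t (i + 1) * t := by
        rw [hq0]; push_cast; ring
      rw [herr, ← hq0]
      exact ih (i + 1) (by omega) (by omega)

lemma pvAlt_inner (n t : Int) (_hn : 0 ≤ n) (_hnt : n ≤ t) :
    (PySem.List.pyRange 0 t 1).map (fun i =>
      PySem.Int.floordiv (PySem.Int.floordiv t 2 + (i + 1) * n) t -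
      PySem.Int.floordiv (PySem.Int.floordiv t 2 + i * n) t) = pvFull n t := by
  rw [PySem.List.pyRange_one, List.map_map, pvFull]
  simp only [sub_zero]
  apply List.map_congr_left
  intro k _
  simp only [Function.comp, zero_add, pvQ]
  push_cast
  ring_nf

-- ===== VERDICT (by name: the statement is the Claim_ definition above) =====
theorem generate_evenly_distributed_schedule_intervals_bresenham_spec : Claim_equal_generate_evenly_distributed_schedule_intervals_bresenham := by
  intro n t _ hpre
  obtain ⟨hn, hnt⟩ := hpre
  have ht : 0 ≤ t := le_trans hn hnt
  have hB : generate_evenly_distributed_schedule_intervals_bresenham_alt n t =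
      (PySem.List.pyRange 0 t 1).map (fun i =>
        PySem.Int.floordiv (PySem.Int.floordiv t 2 + (i + 1) * n) t -
        PySem.Int.floordiv (PySem.Int.floordiv t 2 + i * n) t) := by
    unfold generate_evenly_distributed_schedule_intervals_bresenham_alt
    rw [if_neg (by omega), if_neg (by omega), if_neg (by omega)]
  unfold Spec_generate_evenly_distributed_schedule_intervals_bresenham
  rw [hB]
  unfold generate_evenly_distributed_schedule_intervals_bresenham
  by_cases h0 : n = 0
  · rw [if_pos h0]
    subst h0
    simp only [mul_zero, add_zero, sub_self, List.map_const']
    rw [PySem.List.length_pyRange_one]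
    simp
  · rw [if_neg h0]
    have hnpos : 0 < n := by omega
    rw [if_neg (show ¬ t < n by omega)]
    by_cases heq : n = t
    · rw [if_pos heq]
      subst heq
      have hf : ∀ i ∈ PySem.List.pyRange 0 n 1,
          PySem.Int.floordiv (PySem.Int.floordiv n 2 + (i + 1) * n) n -
          PySem.Int.floordiv (PySem.Int.floordiv n 2 + i * n) n = 1 := by
        intro i hi
        rw [PySem.List.mem_pyRange_one] at hi
        have hh := pvHalf_bounds n hnpos
        have h1 : PySem.Int.floordiv (PySem.Int.floordiv n 2 + (i + 1) * n) n = i + 1 := by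
          rw [PySem.Int.floordiv_eq_iff_of_pos hnpos]
          constructor <;> nlinarith [hh.1, hh.2]
        have h2 : PySem.Int.floordiv (PySem.Int.floordiv n 2 + i * n) n = i := by
          rw [PySem.Int.floordiv_eq_iff_of_pos hnpos]
          constructor <;> nlinarith [hh.1, hh.2]
        rw [h1, h2]; ring
      rw [List.map_congr_left hf, List.map_const']
      rw [PySem.List.length_pyRange_one]
      simp
    · rw [if_neg heq]
      have hlt : n < t := by omega
      have htpos : 0 < t := lt_trans hnpos hlt
      rw [pvAlt_inner n t hn hnt]
      have h := pvALoop_eq n t hnpos hlt t.toNat 0 (by omega)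
        (by rw [pvQ_zero n t htpos]; omega)
      rw [pvQ_zero n t htpos] at h
      simpa [pvFull_length] using h
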